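-- pv_equiv track=rewrite | github.com/mihir965/ai_project_2 | Bot_Improved/rat_catching_improved.py | partition_grid
-- ===== SOURCE A (Python) =====
-- def is_possible_cell(grid, i, j):
--     return grid[i][j] == 0 or grid[i][j] == 2
--
-- def partition_grid(grid, n):
--     quadrants = {
--         'Q1': [],
--         'Q2': [],
--         'Q3': [],
--         'Q4': []
--     }
--     mid = n//2
--     for i in range(mid):
--         for j in range(mid):
--             if is_possible_cell(grid, i, j):
--                 quadrants['Q1'].append((i, j))
--
--     for i in range(mid):
--         for j in range(mid, n):
--             if is_possible_cell(grid, i, j):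
--                 quadrants['Q2'].append((i, j))
--
--     for i in range(mid, n):
--         for j in range(mid):
--             if is_possible_cell(grid, i, j):
--                 quadrants['Q3'].append((i,j))
--
--     for i in range(mid, n):
--         for j in range(mid, n):
--             if is_possible_cell(grid, i, j):
--                 quadrants['Q4'].append((i, j))
--
--     return quadrants
-- ===== SOURCE B (Python) =====
-- def partition_grid(grid, n):
--     mid = n // 2
--     rows = []
--     for i in range(n):
--         cells = [(i, j) for j in range(n) if grid[i][j] in (0, 2)]
--         k = 0
--         while k < len(cells) and cells[k][1] < mid:
--             k += 1
--         rows.append((cells[:k], cells[k:]))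
--     top, bottom = rows[:mid], rows[mid:]
--     return {
--         'Q1': [c for left, _ in top for c in left],
--         'Q2': [c for _, right in top for c in right],
--         'Q3': [c for left, _ in bottom for c in left],
--         'Q4': [c for _, right in bottom for c in right],
--     }
-- ===== Notes on version B (the rewrite author's own statement) =====
-- stated objective: alternative
-- what changed: B builds, per row, the single list of qualifying cells, splits it at the first column >= mid by a prefix-scan (valid because the columns are increasing), then slices the row records into top/bottom halves and concatenates the left/right parts into the four quadrants; A never materialises per-row lists and instead runs four region-specific double loops.
import Mathlib
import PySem

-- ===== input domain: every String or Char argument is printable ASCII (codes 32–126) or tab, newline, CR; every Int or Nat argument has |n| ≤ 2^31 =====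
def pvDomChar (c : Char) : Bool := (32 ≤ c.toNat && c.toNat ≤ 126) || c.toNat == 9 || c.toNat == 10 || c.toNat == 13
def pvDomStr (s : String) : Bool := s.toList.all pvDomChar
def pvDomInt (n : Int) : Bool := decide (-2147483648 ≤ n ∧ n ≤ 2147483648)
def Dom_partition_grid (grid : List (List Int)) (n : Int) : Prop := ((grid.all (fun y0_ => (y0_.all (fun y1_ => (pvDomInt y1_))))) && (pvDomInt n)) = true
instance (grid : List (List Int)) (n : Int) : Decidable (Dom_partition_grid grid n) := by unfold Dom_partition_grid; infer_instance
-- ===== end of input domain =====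

-- One-line summary: B builds each row's qualifying-cell list once, splits it at the first
-- column ≥ mid by a prefix scan (columns are increasing), slices the rows into top/bottom
-- and concatenates; A runs four region-specific double loops (objective: alternative).


-- ===== PORT A =====
-- `grid[i][j] == 0 or grid[i][j] == 2`; none = IndexError (the inputs reaching it are outside Pre_)
def is_possible_cell (grid : List (List Int)) (i j : Int) : Bool :=
  match (PySem.List.pyGet? grid i).bind (fun row => PySem.List.pyGet? row j) with
  | some v => v == 0 || v == 2
  | none => false

def partition_grid (grid : List (List Int)) (n : Int) : List (String × List (Int × Int)) :=
  -- the dict with the four fixed keys is represented by four accumulator lists, returned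
  -- as the association list in insertion order
  let mid := PySem.Int.floordiv n 2
  let q1 := (PySem.List.pyRange 0 mid 1).foldl (fun acc i =>
    (PySem.List.pyRange 0 mid 1).foldl (fun acc j =>
      if is_possible_cell grid i j then acc ++ [(i, j)] else acc) acc) []
  let q2 := (PySem.List.pyRange 0 mid 1).foldl (fun acc i =>
    (PySem.List.pyRange mid n 1).foldl (fun acc j =>
      if is_possible_cell grid i j then acc ++ [(i, j)] else acc) acc) []
  let q3 := (PySem.List.pyRange mid n 1).foldl (fun acc i =>
    (PySem.List.pyRange 0 mid 1).foldl (fun acc j =>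
      if is_possible_cell grid i j then acc ++ [(i, j)] else acc) acc) []
  let q4 := (PySem.List.pyRange mid n 1).foldl (fun acc i =>
    (PySem.List.pyRange mid n 1).foldl (fun acc j =>
      if is_possible_cell grid i j then acc ++ [(i, j)] else acc) acc) []
  [("Q1", q1), ("Q2", q2), ("Q3", q3), ("Q4", q4)]

-- ===== PORT B =====
-- `grid[i][j] in (0, 2)`; none = IndexError (outside Pre_)
def pgAltCell (grid : List (List Int)) (i j : Int) : Bool :=
  match (PySem.List.pyGet? grid i).bind (fun row => PySem.List.pyGet? row j) with
  | some v => [(0 : Int), 2].contains v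
  | none => false

-- `k = 0; while k < len(cells) and cells[k][1] < mid: k += 1` — the obvious structural
-- recursion over the list (each step looks at cells[k], i.e. the next element)
def pgSplitCount (cells : List (Int × Int)) (mid : Int) : Nat :=
  match cells with
  | [] => 0
  | c :: t => if c.2 < mid then pgSplitCount t mid + 1 else 0

def partition_grid_alt (grid : List (List Int)) (n : Int) : List (String × List (Int × Int)) :=
  let mid := PySem.Int.floordiv n 2
  -- `rows = []; for i in range(n): ... rows.append((cells[:k], cells[k:]))`
  -- cells[:k]/cells[k:] with k a nonnegative Python int are exactly take/drop
  let rows := (PySem.List.pyRange 0 n 1).foldl (fun rows i =>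
    let cells := ((PySem.List.pyRange 0 n 1).filter (fun j => pgAltCell grid i j)).map (fun j => (i, j))
    let k := pgSplitCount cells mid
    rows ++ [(cells.take k, cells.drop k)]) []
  let top := PySem.List.slice rows none (some mid)
  let bottom := PySem.List.slice rows (some mid) none
  [("Q1", top.flatMap (fun r => r.1)),
   ("Q2", top.flatMap (fun r => r.2)),
   ("Q3", bottom.flatMap (fun r => r.1)),
   ("Q4", bottom.flatMap (fun r => r.2))]

-- ===== PRECONDITION & SPEC =====
-- Pre_ excludes exactly the inputs where Python A raises IndexError: fewer than n rows, or
-- a row among the first n shorter than n.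
def Pre_partition_grid (grid : List (List Int)) (n : Int) : Prop :=
  n ≤ (grid.length : Int) ∧ ∀ row ∈ grid.take n.toNat, n ≤ (row.length : Int)
instance (grid : List (List Int)) (n : Int) : Decidable (Pre_partition_grid grid n) := by
  unfold Pre_partition_grid; infer_instance

def pvWitness_partition_grid : List (List Int) × Int := ([[0, 1, 2], [2, 3, 0], [1, 0, 0]], 3)

def Spec_partition_grid (grid : List (List Int)) (n : Int) (out : List (String × List (Int × Int))) : Prop := out = partition_grid_alt grid n
instance (grid : List (List Int)) (n : Int) (out : List (String × List (Int × Int))) : Decidable (Spec_partition_grid grid n out) := by unfold Spec_partition_grid; infer_instance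

-- ===== CLAIM (what is proved, stated in full; the proofs are below) =====
def Claim_equal_partition_grid : Prop := ∀ (grid : List (List Int)) (n : Int), Dom_partition_grid grid n → Pre_partition_grid grid n → Spec_partition_grid grid n (partition_grid grid n)

-- ===== LEMMAS AND PROOFS =====

-- B's membership test computes the same Bool as A's helper
lemma pgAltCell_eq (grid : List (List Int)) (i j : Int) :
    pgAltCell grid i j = is_possible_cell grid i j := by
  unfold pgAltCell is_possible_cell
  cases (PySem.List.pyGet? grid i).bind (fun row => PySem.List.pyGet? row j) with
  | none => rfl
  | some v => by_cases h0 : v = 0 <;> by_cases h2 : v = 2 <;> simp [h0, h2]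

-- the while-loop split of a snd-increasing list is the filter split
lemma splitCount_take (l : List (Int × Int)) (mid : Int)
    (h : l.Pairwise (fun a b => a.2 < b.2)) :
    l.take (pgSplitCount l mid) = l.filter (fun c => decide (c.2 < mid)) := by
  induction l with
  | nil => rfl
  | cons c t ih =>
    rcases List.pairwise_cons.mp h with ⟨hc, ht⟩
    by_cases hm : c.2 < mid
    · simp [pgSplitCount, hm, ih ht]
    · have : t.filter (fun c => decide (c.2 < mid)) = [] :=
        List.filter_eq_nil_iff.mpr (fun x hx => by
          have := hc x hx; simp; omega)
      simp [pgSplitCount, hm, this]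

lemma splitCount_drop (l : List (Int × Int)) (mid : Int)
    (h : l.Pairwise (fun a b => a.2 < b.2)) :
    l.drop (pgSplitCount l mid) = l.filter (fun c => !decide (c.2 < mid)) := by
  induction l with
  | nil => rfl
  | cons c t ih =>
    rcases List.pairwise_cons.mp h with ⟨hc, ht⟩
    by_cases hm : c.2 < mid
    · simp [pgSplitCount, hm, ih ht]
    · have : t.filter (fun c => !decide (c.2 < mid)) = t :=
        List.filter_eq_self.mpr (fun x hx => by
          have := hc x hx; simp; omega)
      simp [pgSplitCount, hm, this]

-- filtering p&&q over a split range when q is constant on each half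
lemma filter_and_selA (p q : Int -> Bool) (c1 c2 : List Int)
    (h1 : ∀ j ∈ c1, q j = true) (h2 : ∀ j ∈ c2, q j = false) :
    (c1 ++ c2).filter (fun j => p j && q j) = c1.filter p := by
  rw [List.filter_append]
  have e1 : c1.filter (fun j => p j && q j) = c1.filter p :=
    List.filter_congr (fun j hj => by simp [h1 j hj])
  have e2 : c2.filter (fun j => p j && q j) = [] :=
    List.filter_eq_nil_iff.mpr (fun j hj => by simp [h2 j hj])
  rw [e1, e2, List.append_nil]

lemma filter_and_selB (p q : Int -> Bool) (c1 c2 : List Int)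
    (h1 : ∀ j ∈ c1, q j = false) (h2 : ∀ j ∈ c2, q j = true) :
    (c1 ++ c2).filter (fun j => p j && q j) = c2.filter p := by
  rw [List.filter_append]
  have e2 : c2.filter (fun j => p j && q j) = c2.filter p :=
    List.filter_congr (fun j hj => by simp [h2 j hj])
  have e1 : c1.filter (fun j => p j && q j) = [] :=
    List.filter_eq_nil_iff.mpr (fun j hj => by simp [h1 j hj])
  rw [e1, e2, List.nil_append]

-- the cells list of row i is snd-increasing
lemma cells_pairwise (p : Int -> Bool) (i lo hi : Int) :
    (((PySem.List.pyRange lo hi 1).filter p).map (fun j => (i, j))).Pairwise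
      (fun a b => a.2 < b.2) := by
  refine List.Pairwise.map _ (fun a b h => h) ?_
  exact (PySem.List.pairwise_lt_pyRange_one lo hi).filter p

-- B's left/right parts of row i, when the range is split at mid, are A's per-row filters
lemma row_left (p : Int -> Bool) (i mid hi : Int) (h0 : 0 ≤ mid) (hm : mid ≤ hi) :
    (let cells := ((PySem.List.pyRange 0 hi 1).filter p).map (fun j => (i, j))
     cells.take (pgSplitCount cells mid))
    = ((PySem.List.pyRange 0 mid 1).filter p).map (fun j => (i, j)) := by
  have hpw := cells_pairwise p i 0 hi
  simp only [splitCount_take _ _ hpw, List.filter_map]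
  have : ((PySem.List.pyRange 0 hi 1).filter p).filter
        ((fun c => decide (c.2 < mid)) ∘ (fun j => ((i, j) : Int × Int)))
      = (PySem.List.pyRange 0 hi 1).filter (fun j => p j && decide (j < mid)) := by
    simp only [List.filter_filter]
    exact List.filter_congr (fun j _ => Bool.and_comm _ _)
  rw [this, PySem.List.pyRange_one_append 0 mid hi h0 hm,
      filter_and_selA p (fun j => decide (j < mid)) _ _
        (fun j hj => decide_eq_true (PySem.List.mem_pyRange_one.mp hj).2)
        (fun j hj => decide_eq_false (by have := (PySem.List.mem_pyRange_one.mp hj).1; omega))]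

lemma row_right (p : Int -> Bool) (i mid hi : Int) (h0 : 0 ≤ mid) (hm : mid ≤ hi) :
    (let cells := ((PySem.List.pyRange 0 hi 1).filter p).map (fun j => (i, j))
     cells.drop (pgSplitCount cells mid))
    = ((PySem.List.pyRange mid hi 1).filter p).map (fun j => (i, j)) := by
  have hpw := cells_pairwise p i 0 hi
  simp only [splitCount_drop _ _ hpw, List.filter_map]
  have : ((PySem.List.pyRange 0 hi 1).filter p).filter
        ((fun c => !decide (c.2 < mid)) ∘ (fun j => ((i, j) : Int × Int)))
      = (PySem.List.pyRange 0 hi 1).filter (fun j => p j && !decide (j < mid)) := by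
    simp only [List.filter_filter]
    exact List.filter_congr (fun j _ => Bool.and_comm _ _)
  rw [this, PySem.List.pyRange_one_append 0 mid hi h0 hm,
      filter_and_selB p (fun j => !decide (j < mid)) _ _
        (fun j hj => by simp [decide_eq_true (PySem.List.mem_pyRange_one.mp hj).2])
        (fun j hj => by
          have := (PySem.List.mem_pyRange_one.mp hj).1
          simp; omega)]

-- VERDICT proof
theorem partition_grid_spec : Claim_equal_partition_grid := by
  intro grid n _ _
  unfold Spec_partition_grid partition_grid partition_grid_alt
  simp only [pgAltCell_eq, PySem.List.foldl_append_if, PySem.List.foldl_append_eq_flatMap,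
    ← List.map_eq_flatMap, List.nil_append]
  rw [PySem.Int.floordiv_eq_ediv_of_pos (by norm_num)]
  set P := is_possible_cell grid with hP
  by_cases hn : n ≤ 0
  · have h1 : PySem.List.pyRange 0 n 1 = [] := PySem.List.pyRange_one_eq_nil hn
    have h2 : PySem.List.pyRange 0 (n / 2) 1 = [] :=
      PySem.List.pyRange_one_eq_nil (by omega)
    have h3 : PySem.List.pyRange (n / 2) n 1 = [] :=
      PySem.List.pyRange_one_eq_nil (by omega)
    rw [h1, h2, h3]
    simp [PySem.List.slice]
  · have h0m : (0 : Int) ≤ n / 2 := by omega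
    have hmn : n / 2 ≤ n := by omega
    -- the per-row map, with the split-at-mid parts rewritten to A's per-row filters
    have hrow : (PySem.List.pyRange 0 n 1).map (fun i =>
          (List.take (pgSplitCount (((PySem.List.pyRange 0 n 1).filter (fun j => P i j)).map (fun j => (i, j))) (n / 2))
             (((PySem.List.pyRange 0 n 1).filter (fun j => P i j)).map (fun j => (i, j))),
           List.drop (pgSplitCount (((PySem.List.pyRange 0 n 1).filter (fun j => P i j)).map (fun j => (i, j))) (n / 2))
             (((PySem.List.pyRange 0 n 1).filter (fun j => P i j)).map (fun j => (i, j)))))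
        = (PySem.List.pyRange 0 n 1).map (fun i =>
            (((PySem.List.pyRange 0 (n / 2) 1).filter (fun j => P i j)).map (fun j => (i, j)),
             ((PySem.List.pyRange (n / 2) n 1).filter (fun j => P i j)).map (fun j => (i, j)))) :=
      List.map_congr_left (fun i _ => by
        rw [Prod.mk.injEq]
        exact ⟨row_left (fun j => P i j) i (n / 2) n h0m hmn,
               row_right (fun j => P i j) i (n / 2) n h0m hmn⟩)
    rw [hrow]
    -- slice the rows: rows[:mid] covers pyRange 0 mid, rows[mid:] covers pyRange mid n
    rw [PySem.List.pyRange_one_append 0 (n / 2) n h0m hmn, List.map_append,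
        PySem.List.slice_to _ h0m, PySem.List.slice_from _ h0m]
    have hlen : ((PySem.List.pyRange 0 (n / 2) 1).map (fun i =>
        (((PySem.List.pyRange 0 (n / 2) 1).filter (fun j => P i j)).map (fun j => (i, j)),
         ((PySem.List.pyRange (n / 2) n 1).filter (fun j => P i j)).map (fun j => (i, j))))).length
        = (n / 2).toNat := by
      rw [List.length_map, PySem.List.length_pyRange_one]; omega
    rw [← hlen, List.take_left, List.drop_left]
    simp [List.flatMap_map]
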